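-- pv_equiv track=rewrite | github.com/rosyrosys/arca-musarithmica | arca/data.py | place_in_voice
-- ===== SOURCE A (Python) =====
-- from typing import Dict, List, Optional, Tuple
--
-- _PC_BASE = {"C": 0, "D": 2, "E": 4, "F": 5, "G": 7, "A": 9, "B": 11}
--
-- def pitch_to_midi(pitch: str, octave: int) -> int:
--     """Convert a pitch name like 'B-' or 'F#' and an octave to a MIDI number.
--
--     Middle C = C4 = 60 (standard MIDI).
--     """
--     if not pitch:
--         raise ValueError("empty pitch")
--     letter = pitch[0].upper()
--     if letter not in _PC_BASE:
--         raise ValueError(f"unknown pitch letter: {letter!r}")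
--     semitone = _PC_BASE[letter]
--     for accidental in pitch[1:]:
--         if accidental == "#":
--             semitone += 1
--         elif accidental == "-":
--             semitone -= 1
--         elif accidental == "b":   # allow 'Bb' as alias for 'B-'
--             semitone -= 1
--         else:
--             raise ValueError(f"unknown accidental in {pitch!r}")
--     return 12 * (octave + 1) + semitone
--
-- VOICE_RANGES = {
--     0: (60, 81),   # Cantus: C4 .. A5
--     1: (53, 74),   # Altus:  F3 .. D5
--     2: (48, 69),   # Tenor:  C3 .. A4
--     3: (40, 62),   # Bassus: E2 .. D4
-- }
--
-- VOICE_CENTERS = {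
--     0: 72,   # Cantus ~ C5
--     1: 65,   # Altus  ~ F4
--     2: 57,   # Tenor  ~ A3
--     3: 48,   # Bassus ~ C3
-- }
--
-- def place_in_voice(
--     pitch: str,
--     voice_idx: int,
--     prefer_upper: bool = False,
--     upper_bound: Optional[int] = None,
--     prev_midi: Optional[int] = None,
-- ) -> int:
--     """Return the MIDI number for *pitch* that sits most comfortably in the
--     given SATB voice.
--
--     Placement priority (in order):
--       1. The note must be within the voice's standard range.
--       2. The note must be <= upper_bound (to keep voices in SATB order).
--       3. If *prev_midi* is given, minimize motion from the previous chord
--          — this is the classical smooth-voice-leading heuristic.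
--       4. Otherwise, pick the octave closest to the voice's center
--          (biased upward if Kircher's number 8 is being placed).
--     """
--     lo, hi = VOICE_RANGES[voice_idx]
--     if prev_midi is not None:
--         target = prev_midi
--     else:
--         target = VOICE_CENTERS[voice_idx] + (7 if prefer_upper else 0)
--
--     # Priority tiers:
--     #   tier 1 — in-range AND at/below the upper bound (best case)
--     #   tier 2 — in-range even if it violates the ordering bound
--     #            (the voice-crossing checker will flag this)
--     #   tier 3 — any candidate (last resort)
--     tier1: List[Tuple[int, int]] = []
--     tier2: List[Tuple[int, int]] = []
--     tier3: List[Tuple[int, int]] = []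
--     for oct in range(0, 8):
--         midi = pitch_to_midi(pitch, oct)
--         dist = abs(midi - target)
--         in_r = lo <= midi <= hi
--         under_ub = upper_bound is None or midi <= upper_bound
--         if in_r and under_ub:
--             tier1.append((dist, midi))
--         elif in_r:
--             tier2.append((dist, midi))
--         else:
--             tier3.append((dist, midi))
--
--     if tier1:
--         tier1.sort()
--         return tier1[0][1]
--     if tier2:
--         tier2.sort()
--         return tier2[0][1]
--     tier3.sort()
--     return tier3[0][1] if tier3 else pitch_to_midi(pitch, 4)
-- ===== SOURCE B (Python) =====
-- from typing import Optional
--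
-- _PC_BASE = {"C": 0, "D": 2, "E": 4, "F": 5, "G": 7, "A": 9, "B": 11}
--
-- def pitch_to_midi(pitch: str, octave: int) -> int:
--     if not pitch:
--         raise ValueError("empty pitch")
--     letter = pitch[0].upper()
--     if letter not in _PC_BASE:
--         raise ValueError(f"unknown pitch letter: {letter!r}")
--     semitone = _PC_BASE[letter]
--     for accidental in pitch[1:]:
--         if accidental == "#":
--             semitone += 1
--         elif accidental == "-":
--             semitone -= 1
--         elif accidental == "b":
--             semitone -= 1
--         else:
--             raise ValueError(f"unknown accidental in {pitch!r}")
--     return 12 * (octave + 1) + semitone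
--
-- VOICE_RANGES = {
--     0: (60, 81),
--     1: (53, 74),
--     2: (48, 69),
--     3: (40, 62),
-- }
--
-- VOICE_CENTERS = {0: 72, 1: 65, 2: 57, 3: 48}
--
-- def place_in_voice(
--     pitch: str,
--     voice_idx: int,
--     prefer_upper: bool = False,
--     upper_bound: Optional[int] = None,
--     prev_midi: Optional[int] = None,
-- ) -> int:
--     """Single running-minimum pass: rank each octave's candidate by
--     (priority tier, distance to target, midi) and keep the smallest tuple."""
--     lo, hi = VOICE_RANGES[voice_idx]
--     if prev_midi is not None:
--         target = prev_midi
--     else: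
--         target = VOICE_CENTERS[voice_idx] + (7 if prefer_upper else 0)
--
--     best = None
--     for oct in range(0, 8):
--         midi = pitch_to_midi(pitch, oct)
--         rank = 2
--         if lo <= midi <= hi:
--             rank = 0 if (upper_bound is None or midi <= upper_bound) else 1
--         cand = (rank, abs(midi - target), midi)
--         if best is None or cand < best:
--             best = cand
--     return best[2]
-- ===== Notes on version B (the rewrite author's own statement) =====
-- stated objective: simpler
-- what changed: Replaced the three tier lists plus per-tier sort-and-take-head with a single running-minimum pass over the 8 octaves keyed by the composite tuple (tier rank, distance, midi).
import Mathlib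
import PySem

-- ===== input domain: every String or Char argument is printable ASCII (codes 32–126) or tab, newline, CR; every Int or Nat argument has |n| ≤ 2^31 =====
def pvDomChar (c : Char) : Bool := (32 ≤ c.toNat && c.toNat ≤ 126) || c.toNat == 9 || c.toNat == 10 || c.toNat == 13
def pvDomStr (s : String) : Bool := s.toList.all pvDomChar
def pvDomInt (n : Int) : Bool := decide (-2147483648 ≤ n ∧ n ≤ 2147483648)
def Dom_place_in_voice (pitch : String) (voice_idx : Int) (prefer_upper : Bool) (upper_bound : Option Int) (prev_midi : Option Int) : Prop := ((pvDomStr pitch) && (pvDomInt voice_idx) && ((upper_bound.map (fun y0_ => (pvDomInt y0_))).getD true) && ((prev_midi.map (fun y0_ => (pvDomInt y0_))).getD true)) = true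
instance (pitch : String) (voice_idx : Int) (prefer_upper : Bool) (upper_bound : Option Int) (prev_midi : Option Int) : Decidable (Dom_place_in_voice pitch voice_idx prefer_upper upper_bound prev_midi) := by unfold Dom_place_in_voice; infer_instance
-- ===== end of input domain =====

-- B replaces A's three tier buckets + per-tier sort with one running-minimum pass over a
-- composite (tier rank, distance, midi) key; objective: simpler (same O(1) cost).

-- ===== PORT A =====
-- shared module context: _PC_BASE lookup fused with pitch[0].upper() (exact on the ASCII domain)
def pcBase? (c : Char) : Option Int :=
  if c = 'C' ∨ c = 'c' then some 0
  else if c = 'D' ∨ c = 'd' then some 2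
  else if c = 'E' ∨ c = 'e' then some 4
  else if c = 'F' ∨ c = 'f' then some 5
  else if c = 'G' ∨ c = 'g' then some 7
  else if c = 'A' ∨ c = 'a' then some 9
  else if c = 'B' ∨ c = 'b' then some 11
  else none

-- the accidental loop of pitch_to_midi; none = ValueError
def accStep (acc : Option Int) (a : Char) : Option Int :=
  acc.bind (fun s =>
    if a = '#' then some (s + 1)
    else if a = '-' then some (s - 1)
    else if a = 'b' then some (s - 1)
    else none)

-- pitch_to_midi; none exactly where the Python raises ValueError
def pitch_to_midi? (pitch : List Char) (octave : Int) : Option Int :=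
  match pitch with
  | [] => none
  | c :: rest => (rest.foldl accStep (pcBase? c)).map (fun s => 12 * (octave + 1) + s)

-- VOICE_RANGES[voice_idx] / VOICE_CENTERS[voice_idx]; the defaults are only reached
-- where the Python raises KeyError (excluded by Pre_)
def voiceRange (v : Int) : Int × Int :=
  if v = 0 then (60, 81) else if v = 1 then (53, 74)
  else if v = 2 then (48, 69) else if v = 3 then (40, 62) else (0, 0)

def voiceCenter (v : Int) : Int :=
  if v = 0 then 72 else if v = 1 then 65 else if v = 2 then 57 else if v = 3 then 48 else 0

def place_in_voice (pitch : String) (voice_idx : Int) (prefer_upper : Bool) (upper_bound : Option Int) (prev_midi : Option Int) : Int :=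
  let lh := voiceRange voice_idx
  let lo := lh.1
  let hi := lh.2
  let target : Int :=
    match prev_midi with
    | some p => p
    | none => voiceCenter voice_idx + (if prefer_upper then 7 else 0)
  let tiers :=
    (PySem.List.pyRange 0 8 1).foldl
      (fun (t : List (Int × Int) × List (Int × Int) × List (Int × Int)) oct =>
        let midi := (pitch_to_midi? pitch.toList oct).getD 0  -- some … under Pre_
        let dist := |midi - target|
        let in_r := decide (lo ≤ midi) && decide (midi ≤ hi)
        let under_ub := match upper_bound with | none => true | some ub => decide (midi ≤ ub)
        if in_r && under_ub then (t.1 ++ [(dist, midi)], t.2.1, t.2.2)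
        else if in_r then (t.1, t.2.1 ++ [(dist, midi)], t.2.2)
        else (t.1, t.2.1, t.2.2 ++ [(dist, midi)]))
      ([], [], [])
  -- if tier1: tier1.sort(); return tier1[0][1]  (a tier is empty iff its sort is empty)
  match PySem.List.sorted2 tiers.1 Prod.fst Prod.snd with
  | (_, m) :: _ => m
  | [] =>
    match PySem.List.sorted2 tiers.2.1 Prod.fst Prod.snd with
    | (_, m) :: _ => m
    | [] =>
      match PySem.List.sorted2 tiers.2.2 Prod.fst Prod.snd with
      | (_, m) :: _ => m
      | [] => (pitch_to_midi? pitch.toList 4).getD 0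

-- ===== PORT B =====
-- Python tuple '<' on the 3-tuples B compares
def lt3 (a b : Int × Int × Int) : Bool :=
  decide (a.1 < b.1) ||
    (a.1 == b.1 && (decide (a.2.1 < b.2.1) || (a.2.1 == b.2.1 && decide (a.2.2 < b.2.2))))

def place_in_voice_alt (pitch : String) (voice_idx : Int) (prefer_upper : Bool) (upper_bound : Option Int) (prev_midi : Option Int) : Int :=
  let lh := voiceRange voice_idx
  let lo := lh.1
  let hi := lh.2
  let target : Int :=
    match prev_midi with
    | some p => p
    | none => voiceCenter voice_idx + (if prefer_upper then 7 else 0)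
  let best :=
    (PySem.List.pyRange 0 8 1).foldl
      (fun (best : Option (Int × Int × Int)) oct =>
        let midi := (pitch_to_midi? pitch.toList oct).getD 0  -- some … under Pre_
        let rank : Int :=
          if decide (lo ≤ midi) && decide (midi ≤ hi) then
            (if (match upper_bound with | none => true | some ub => decide (midi ≤ ub)) then 0 else 1)
          else 2
        let cand := (rank, |midi - target|, midi)
        match best with
        | none => some cand
        | some b => if lt3 cand b then some cand else some b)
      none
  match best with
  | some b => b.2.2
  | none => 0  -- never reached: range(0,8) is nonempty

-- ===== PRECONDITION & SPEC =====
-- Pre_ excludes exactly the inputs where A raises: a voice_idx outside VOICE_RANGES (KeyError)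
-- or a pitch that is empty / has an unknown letter or accidental (ValueError).
def Pre_place_in_voice (pitch : String) (voice_idx : Int) (prefer_upper : Bool) (upper_bound : Option Int) (prev_midi : Option Int) : Prop :=
  (voice_idx = 0 ∨ voice_idx = 1 ∨ voice_idx = 2 ∨ voice_idx = 3) ∧
  pitch.toList ≠ [] ∧
  pitch.toList.headI ∈ (['C','c','D','d','E','e','F','f','G','g','A','a','B','b'] : List Char) ∧
  pitch.toList.tail.all (fun a => a == '#' || a == '-' || a == 'b') = true
instance (pitch : String) (voice_idx : Int) (prefer_upper : Bool) (upper_bound : Option Int) (prev_midi : Option Int) : Decidable (Pre_place_in_voice pitch voice_idx prefer_upper upper_bound prev_midi) := by unfold Pre_place_in_voice; infer_instance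

def pvWitness_place_in_voice : String × Int × Bool × Option Int × Option Int := ("B-", 2, false, some 64, none)

def Spec_place_in_voice (pitch : String) (voice_idx : Int) (prefer_upper : Bool) (upper_bound : Option Int) (prev_midi : Option Int) (out : Int) : Prop := out = place_in_voice_alt pitch voice_idx prefer_upper upper_bound prev_midi
instance (pitch : String) (voice_idx : Int) (prefer_upper : Bool) (upper_bound : Option Int) (prev_midi : Option Int) (out : Int) : Decidable (Spec_place_in_voice pitch voice_idx prefer_upper upper_bound prev_midi out) := by unfold Spec_place_in_voice; infer_instance

-- ===== CLAIM (what is proved, stated in full; the proofs are below) =====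
def Claim_equal_place_in_voice : Prop := ∀ (pitch : String) (voice_idx : Int) (prefer_upper : Bool) (upper_bound : Option Int) (prev_midi : Option Int), Dom_place_in_voice pitch voice_idx prefer_upper upper_bound prev_midi → Pre_place_in_voice pitch voice_idx prefer_upper upper_bound prev_midi → Spec_place_in_voice pitch voice_idx prefer_upper upper_bound prev_midi (place_in_voice pitch voice_idx prefer_upper upper_bound prev_midi)


-- ===== LEMMAS AND PROOFS =====

-- the candidate a given octave contributes: (tier rank, distance to target, midi)
def cand (s target lo hi : Int) (ub : Option Int) (oct : Int) : Int × Int × Int :=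
  let midi := 12 * (oct + 1) + s
  ((if decide (lo ≤ midi) && decide (midi ≤ hi) then
      (if (match ub with | none => true | some u => decide (midi ≤ u)) then (0 : Int) else 1)
    else 2), |midi - target|, midi)

-- A's loop body, with the midi rewritten to its value 12*(oct+1)+s, phrased on the candidate
def candStep (c : Int × Int × Int) (t : List (Int × Int) × List (Int × Int) × List (Int × Int)) :
    List (Int × Int) × List (Int × Int) × List (Int × Int) :=
  if c.1 = 0 then (t.1 ++ [c.2], t.2.1, t.2.2)
  else if c.1 = 1 then (t.1, t.2.1 ++ [c.2], t.2.2)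
  else (t.1, t.2.1, t.2.2 ++ [c.2])

-- B's loop body on the candidate
def minStep (c : Int × Int × Int) (b : Option (Int × Int × Int)) : Option (Int × Int × Int) :=
  match b with
  | none => some c
  | some m => if lt3 c m then some c else some m

-- tier selectors: sel 0 / sel 1 / catch-all sel 2
def sel0 (c : Int × Int × Int) : Option (Int × Int) := if c.1 = 0 then some c.2 else none
def sel1 (c : Int × Int × Int) : Option (Int × Int) :=
  if c.1 = 0 then none else if c.1 = 1 then some c.2 else none
def sel2 (c : Int × Int × Int) : Option (Int × Int) :=
  if c.1 = 0 then none else if c.1 = 1 then none else some c.2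

-- the strict comparison PySem.List.sorted2 _ Prod.fst Prod.snd uses on (Int × Int) pairs
def blt (a b : Int × Int) : Bool :=
  decide (a.1 < b.1) || (!decide (b.1 < a.1) && decide (a.2 < b.2))

lemma lt3_irrefl (a : Int × Int × Int) : lt3 a a = false := by
  obtain ⟨a1, a2, a3⟩ := a; simp [lt3]

lemma lt3_false_trans {a b c : Int × Int × Int} (h1 : lt3 a b = false) (h2 : lt3 b c = false) :
    lt3 a c = false := by
  obtain ⟨a1, a2, a3⟩ := a; obtain ⟨b1, b2, b3⟩ := b; obtain ⟨c1, c2, c3⟩ := c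
  simp only [lt3, Bool.or_eq_false_iff, Bool.and_eq_false_iff,
    decide_eq_false_iff_not, beq_eq_false_iff_ne, ne_eq, beq_iff_eq] at *
  omega

lemma lt3_asymm {a b : Int × Int × Int} (h : lt3 a b = true) : lt3 b a = false := by
  obtain ⟨a1, a2, a3⟩ := a; obtain ⟨b1, b2, b3⟩ := b
  simp only [lt3, Bool.or_eq_true, Bool.and_eq_true, decide_eq_true_eq, beq_iff_eq,
    Bool.or_eq_false_iff, Bool.and_eq_false_iff, decide_eq_false_iff_not,
    beq_eq_false_iff_ne, ne_eq] at *
  omega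

lemma blt_irrefl (a : Int × Int) : blt a a = false := by
  obtain ⟨a1, a2⟩ := a; simp [blt]

lemma blt_antisymm {a b : Int × Int} (h1 : blt a b = false) (h2 : blt b a = false) : a = b := by
  obtain ⟨a1, a2⟩ := a; obtain ⟨b1, b2⟩ := b
  simp only [blt, Bool.or_eq_false_iff, Bool.and_eq_false_iff,
    Bool.not_eq_false', decide_eq_false_iff_not, decide_eq_true_eq, Prod.mk.injEq] at *
  omega

lemma blt_cross {x y z : Int × Int} (h1 : blt x y = true) (h2 : blt z y = false) :
    blt z x = false := by
  obtain ⟨x1, x2⟩ := x; obtain ⟨y1, y2⟩ := y; obtain ⟨z1, z2⟩ := z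
  simp only [blt, Bool.or_eq_true, Bool.and_eq_true, Bool.or_eq_false_iff,
    Bool.and_eq_false_iff, Bool.not_eq_true', Bool.not_eq_false', decide_eq_false_iff_not,
    decide_eq_true_eq] at *
  omega

lemma lt3_eq_blt_of_fst_eq {a b : Int × Int × Int} (h : a.1 = b.1) : lt3 a b = blt a.2 b.2 := by
  obtain ⟨a1, a2, a3⟩ := a; obtain ⟨b1, b2, b3⟩ := b
  simp only at h; subst h
  simp only [lt3, blt]
  rcases Int.lt_trichotomy a2 b2 with h2 | rfl | h2
  · simp [h2, show ¬ b2 < a2 by omega]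
  · simp [lt_irrefl]
  · simp [show ¬ a2 < b2 by omega, show a2 ≠ b2 by omega, h2]

lemma cand_rank_cases (s target lo hi : Int) (ub : Option Int) (oct : Int) :
    (cand s target lo hi ub oct).1 = 0 ∨ (cand s target lo hi ub oct).1 = 1 ∨
      (cand s target lo hi ub oct).1 = 2 := by
  simp only [cand]
  split_ifs <;> simp

-- insertBy into a list whose head is minimal keeps the pairwise-minimal shape
lemma insertBy_pairwise {α : Type} (before : α → α → Bool)
    (hA : ∀ a b, before a b = true → before b a = false)
    (hT : ∀ x y z, before x y = true → before z y = false → before z x = false)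
    (x : α) : ∀ ys : List α, ys.Pairwise (fun a b => before b a = false) →
      (PySem.List.insertBy before x ys).Pairwise (fun a b => before b a = false) := by
  intro ys
  induction ys with
  | nil => intro _; simp [PySem.List.insertBy]
  | cons y ys ih =>
    intro hp
    rw [List.pairwise_cons] at hp
    by_cases hxy : before x y = true
    · have : PySem.List.insertBy before x (y :: ys) = x :: y :: ys := by
        simp [PySem.List.insertBy, hxy]
      rw [this, List.pairwise_cons]
      refine ⟨?_, List.pairwise_cons.mpr hp⟩
      intro z hz
      rcases List.mem_cons.mp hz with rfl | hz
      · exact hA _ _ hxy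
      · exact hT x y z hxy (hp.1 z hz)
    · have : PySem.List.insertBy before x (y :: ys) = y :: PySem.List.insertBy before x ys := by
        simp [PySem.List.insertBy, hxy]
      rw [this, List.pairwise_cons]
      refine ⟨?_, ih hp.2⟩
      intro z hz
      rcases (PySem.List.mem_insertBy before x z ys).mp hz with rfl | hz
      · simpa using hxy
      · exact hp.1 z hz

lemma foldl_insertBy_pairwise {α : Type} (before : α → α → Bool)
    (hA : ∀ a b, before a b = true → before b a = false)
    (hT : ∀ x y z, before x y = true → before z y = false → before z x = false) :
    ∀ (xs acc : List α), acc.Pairwise (fun a b => before b a = false) →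
      (xs.foldl (fun acc x => PySem.List.insertBy before x acc) acc).Pairwise
        (fun a b => before b a = false) := by
  intro xs
  induction xs with
  | nil => intro acc h; simpa using h
  | cons x xs ih =>
    intro acc h
    exact ih _ (insertBy_pairwise before hA hT x acc h)

lemma sorted2_eq_foldl (xs : List (Int × Int)) :
    PySem.List.sorted2 xs Prod.fst Prod.snd false =
      xs.foldl (fun acc x => PySem.List.insertBy blt x acc) [] := rfl

lemma sorted2_pairwise_blt (xs : List (Int × Int)) :
    (PySem.List.sorted2 xs Prod.fst Prod.snd false).Pairwise (fun a b => blt b a = false) := by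
  rw [sorted2_eq_foldl]
  exact foldl_insertBy_pairwise blt
    (fun a b h => by
      have := blt_cross (x := a) (y := b) (z := b) h (blt_irrefl b); exact this)
    (fun x y z h1 h2 => blt_cross h1 h2) xs [] (by simp)

-- head of sorted tier = the blt-minimal element of the tier
lemma head_sorted2_min {xs : List (Int × Int)} {p : Int × Int} {t : List (Int × Int)}
    (h : PySem.List.sorted2 xs Prod.fst Prod.snd false = p :: t) :
    p ∈ xs ∧ ∀ y ∈ xs, blt y p = false := by
  have hperm := PySem.List.sorted2_perm xs Prod.fst Prod.snd false
  rw [h] at hperm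
  constructor
  · exact hperm.mem_iff.mp (List.mem_cons_self)
  · intro y hy
    have hy' : y ∈ p :: t := hperm.mem_iff.mpr hy
    rcases List.mem_cons.mp hy' with rfl | hy'
    · exact blt_irrefl _
    · have hp := sorted2_pairwise_blt xs
      rw [h, List.pairwise_cons] at hp
      exact hp.1 y hy'

-- A's tier fold, characterised by the three selectors
lemma foldA_spec : ∀ (cs : List (Int × Int × Int))
    (t : List (Int × Int) × List (Int × Int) × List (Int × Int)),
    cs.foldl (fun t c => candStep c t) t =
      (t.1 ++ cs.filterMap sel0, t.2.1 ++ cs.filterMap sel1, t.2.2 ++ cs.filterMap sel2) := by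
  intro cs
  induction cs with
  | nil => intro t; simp
  | cons c cs ih =>
    intro t
    simp only [List.foldl_cons, ih, List.filterMap_cons]
    by_cases h0 : c.1 = 0
    · simp [candStep, sel0, sel1, sel2, h0]
    · by_cases h1 : c.1 = 1
      · simp [candStep, sel0, sel1, sel2, h0, h1]
      · simp [candStep, sel0, sel1, sel2, h0, h1]

-- B's running minimum, characterised: it returns a member minimal for lt3
lemma foldB_spec : ∀ (cs : List (Int × Int × Int)) (m0 : Int × Int × Int),
    ∃ m, cs.foldl (fun b c => minStep c b) (some m0) = some m ∧
      m ∈ m0 :: cs ∧ ∀ y ∈ m0 :: cs, lt3 y m = false := by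
  intro cs
  induction cs with
  | nil =>
    intro m0
    exact ⟨m0, rfl, List.mem_cons_self, by
      intro y hy; rcases List.mem_cons.mp hy with rfl | hy
      · exact lt3_irrefl y
      · simp at hy⟩
  | cons c cs ih =>
    intro m0
    by_cases hc : lt3 c m0 = true
    · obtain ⟨m, hm, hmem, hmin⟩ := ih c
      refine ⟨m, ?_, ?_, ?_⟩
      · simpa [minStep, hc] using hm
      · rcases List.mem_cons.mp hmem with rfl | hmem
        · exact List.mem_cons.mpr (Or.inr List.mem_cons_self)
        · exact List.mem_cons.mpr (Or.inr (List.mem_cons.mpr (Or.inr hmem)))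
      · intro y hy
        rcases List.mem_cons.mp hy with rfl | hy
        · exact lt3_false_trans (lt3_asymm hc) (hmin c List.mem_cons_self)
        · exact hmin y hy
    · obtain ⟨m, hm, hmem, hmin⟩ := ih m0
      refine ⟨m, ?_, ?_, ?_⟩
      · simpa [minStep, hc] using hm
      · rcases List.mem_cons.mp hmem with rfl | hmem
        · exact List.mem_cons_self
        · exact List.mem_cons.mpr (Or.inr (List.mem_cons.mpr (Or.inr hmem)))
      · intro y hy
        rcases List.mem_cons.mp hy with rfl | hy
        · exact hmin _ List.mem_cons_self
        · rcases List.mem_cons.mp hy with rfl | hy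
          · exact lt3_false_trans (Bool.eq_false_iff.mpr (fun h => hc h)) (hmin _ List.mem_cons_self)
          · exact hmin y (List.mem_cons.mpr (Or.inr hy))

-- under Pre_ the pitch has a well-defined semitone value
lemma semitone_exists {pitch : String}
    (hne : pitch.toList ≠ [])
    (hhead : pitch.toList.headI ∈ (['C','c','D','d','E','e','F','f','G','g','A','a','B','b'] : List Char))
    (htail : ∀ a ∈ pitch.toList.tail, a = '#' ∨ a = '-' ∨ a = 'b') :
    ∃ s : Int, ∀ oct : Int, pitch_to_midi? pitch.toList oct = some (12 * (oct + 1) + s) := by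
  obtain ⟨c, rest, hcr⟩ := List.exists_cons_of_ne_nil hne
  rw [hcr] at hhead htail ⊢
  simp only [List.headI_cons] at hhead
  simp only [List.tail_cons] at htail
  have hbase : (pcBase? c).isSome := by fin_cases hhead <;> decide
  obtain ⟨b, hb⟩ := Option.isSome_iff_exists.mp hbase
  have hacc : ∀ (rest : List Char), (∀ a ∈ rest, a = '#' ∨ a = '-' ∨ a = 'b') →
      ∀ s : Int, ∃ s', rest.foldl accStep (some s) = some s' := by
    intro rest
    induction rest with
    | nil => intro _ s; exact ⟨s, rfl⟩
    | cons a rest ih =>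
      intro h s
      have ha := h a List.mem_cons_self
      have hrest := fun x hx => h x (List.mem_cons.mpr (Or.inr hx))
      rcases ha with rfl | rfl | rfl
      · simpa [accStep] using ih hrest (s + 1)
      · simpa [accStep] using ih hrest (s - 1)
      · simpa [accStep] using ih hrest (s - 1)
  obtain ⟨s, hs⟩ := hacc rest htail b
  refine ⟨s, fun oct => ?_⟩
  simp [pitch_to_midi?, hb, hs, Int.add_comm]

-- rank strictly smaller wins outright
lemma lt3_of_fst_lt {a b : Int × Int × Int} (h : a.1 < b.1) : lt3 a b = true := by
  obtain ⟨a1, a2, a3⟩ := a; obtain ⟨b1, b2, b3⟩ := b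
  simp only at h
  simp [lt3, h]

-- head of the sorted tier of rank-r candidates = projection of B's overall minimum
lemma tier_head_eq {cs : List (Int × Int × Int)} {T : List (Int × Int)}
    {m : Int × Int × Int} {r : Int} {p : Int × Int} {t : List (Int × Int)}
    (hmem_iff : ∀ y, y ∈ T ↔ ∃ c ∈ cs, c.1 = r ∧ c.2 = y)
    (hm : m ∈ cs) (hmr : m.1 = r)
    (hmin : ∀ y ∈ cs, lt3 y m = false)
    (hT : PySem.List.sorted2 T Prod.fst Prod.snd false = p :: t) :
    p = m.2 := by
  obtain ⟨hpT, hpmin⟩ := head_sorted2_min hT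
  obtain ⟨c, hc, hcr, hcp⟩ := (hmem_iff p).mp hpT
  have hm2 : m.2 ∈ T := (hmem_iff m.2).mpr ⟨m, hm, hmr, rfl⟩
  have h1 : blt m.2 p = false := hpmin _ hm2
  have h2 : blt p m.2 = false := by
    have := hmin c hc
    rw [lt3_eq_blt_of_fst_eq (by rw [hcr, hmr])] at this
    rw [← hcp]; exact this
  exact blt_antisymm h2 h1

-- the central equivalence, with the semitone value abstracted out
lemma main_eq (pitch : String) (s target lo hi : Int) (ub : Option Int)
    (h : ∀ oct : Int, pitch_to_midi? pitch.toList oct = some (12 * (oct + 1) + s)) :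
    (let tiers :=
      (PySem.List.pyRange 0 8 1).foldl
        (fun (t : List (Int × Int) × List (Int × Int) × List (Int × Int)) oct =>
          let midi := (pitch_to_midi? pitch.toList oct).getD 0
          let dist := |midi - target|
          let in_r := decide (lo ≤ midi) && decide (midi ≤ hi)
          let under_ub := match ub with | none => true | some u => decide (midi ≤ u)
          if in_r && under_ub then (t.1 ++ [(dist, midi)], t.2.1, t.2.2)
          else if in_r then (t.1, t.2.1 ++ [(dist, midi)], t.2.2)
          else (t.1, t.2.1, t.2.2 ++ [(dist, midi)]))
        ([], [], [])
    match PySem.List.sorted2 tiers.1 Prod.fst Prod.snd with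
    | (_, m) :: _ => m
    | [] =>
      match PySem.List.sorted2 tiers.2.1 Prod.fst Prod.snd with
      | (_, m) :: _ => m
      | [] =>
        match PySem.List.sorted2 tiers.2.2 Prod.fst Prod.snd with
        | (_, m) :: _ => m
        | [] => (pitch_to_midi? pitch.toList 4).getD 0) =
    (let best :=
      (PySem.List.pyRange 0 8 1).foldl
        (fun (best : Option (Int × Int × Int)) oct =>
          let midi := (pitch_to_midi? pitch.toList oct).getD 0
          let rank : Int :=
            if decide (lo ≤ midi) && decide (midi ≤ hi) then
              (if (match ub with | none => true | some u => decide (midi ≤ u)) then 0 else 1)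
            else 2
          let cand := (rank, |midi - target|, midi)
          match best with
          | none => some cand
          | some b => if lt3 cand b then some cand else some b)
        none
    match best with
    | some b => b.2.2
    | none => 0) := by
  -- rewrite both loop bodies onto the shared candidate function
  have hA : (fun (t : List (Int × Int) × List (Int × Int) × List (Int × Int)) (oct : Int) =>
      let midi := (pitch_to_midi? pitch.toList oct).getD 0
      let dist := |midi - target|
      let in_r := decide (lo ≤ midi) && decide (midi ≤ hi)
      let under_ub := match ub with | none => true | some u => decide (midi ≤ u)
      if in_r && under_ub then (t.1 ++ [(dist, midi)], t.2.1, t.2.2)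
      else if in_r then (t.1, t.2.1 ++ [(dist, midi)], t.2.2)
      else (t.1, t.2.1, t.2.2 ++ [(dist, midi)])) =
      (fun t oct => candStep (cand s target lo hi ub oct) t) := by
    funext t oct
    rw [h oct]
    simp only [Option.getD_some]
    by_cases h1 : lo ≤ 12 * (oct + 1) + s <;>
      by_cases h2 : 12 * (oct + 1) + s ≤ hi <;>
        cases hY : (match ub with | none => true | some u => decide (12 * (oct + 1) + s ≤ u)) <;>
          simp [candStep, cand, h1, h2, hY] <;> exact hY
  have hB : (fun (best : Option (Int × Int × Int)) (oct : Int) =>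
      let midi := (pitch_to_midi? pitch.toList oct).getD 0
      let rank : Int :=
        if decide (lo ≤ midi) && decide (midi ≤ hi) then
          (if (match ub with | none => true | some u => decide (midi ≤ u)) then 0 else 1)
        else 2
      let cand := (rank, |midi - target|, midi)
      match best with
      | none => some cand
      | some b => if lt3 cand b then some cand else some b) =
      (fun b oct => minStep (cand s target lo hi ub oct) b) := by
    funext b oct
    rw [h oct]
    rfl
  simp only [hA, hB]
  rw [show ∀ (init : List (Int × Int) × List (Int × Int) × List (Int × Int)),
      (PySem.List.pyRange 0 8 1).foldl (fun t oct => candStep (cand s target lo hi ub oct) t) init =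
      ((PySem.List.pyRange 0 8 1).map (cand s target lo hi ub)).foldl (fun t c => candStep c t) init
    from fun init => (List.foldl_map (f := cand s target lo hi ub)
      (g := fun t c => candStep c t) (l := PySem.List.pyRange 0 8 1) (init := init)).symm]
  rw [show (PySem.List.pyRange 0 8 1).foldl (fun b oct => minStep (cand s target lo hi ub oct) b) none =
      ((PySem.List.pyRange 0 8 1).map (cand s target lo hi ub)).foldl (fun b c => minStep c b) none
    from (List.foldl_map (f := cand s target lo hi ub)
      (g := fun b c => minStep c b) (l := PySem.List.pyRange 0 8 1) (init := none)).symm]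
  generalize hcseq : (PySem.List.pyRange 0 8 1).map (cand s target lo hi ub) = cs
  have hrank : ∀ c ∈ cs, c.1 = 0 ∨ c.1 = 1 ∨ c.1 = 2 := by
    intro c hc
    rw [← hcseq] at hc
    obtain ⟨oct, _, rfl⟩ := List.mem_map.mp hc
    exact cand_rank_cases s target lo hi ub oct
  have hcs_ne : cs ≠ [] := by
    rw [← hcseq]
    intro hnil
    rw [List.map_eq_nil_iff] at hnil
    exact absurd hnil (by decide)
  obtain ⟨c0, cs', rfl⟩ := List.exists_cons_of_ne_nil hcs_ne
  rw [foldA_spec]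
  obtain ⟨m, hm, hmem, hmin⟩ := foldB_spec cs' c0
  rw [show ((c0 :: cs').foldl (fun b c => minStep c b) none) = some m from by
    simpa [minStep] using hm]
  simp only [List.nil_append]
  -- tier membership characterisations
  have hmem0 : ∀ y, y ∈ (c0 :: cs').filterMap sel0 ↔ ∃ c ∈ c0 :: cs', c.1 = 0 ∧ c.2 = y := by
    intro y
    simp only [List.mem_filterMap, sel0]
    constructor
    · rintro ⟨c, hc, hcy⟩
      by_cases h0 : c.1 = 0
      · rw [if_pos h0] at hcy; exact ⟨c, hc, h0, Option.some.inj hcy⟩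
      · rw [if_neg h0] at hcy; cases hcy
    · rintro ⟨c, hc, h0, rfl⟩
      exact ⟨c, hc, by rw [if_pos h0]⟩
  cases hT0 : PySem.List.sorted2 ((c0 :: cs').filterMap sel0) Prod.fst Prod.snd with
  | cons p t =>
    have hex := (hmem0 p).mp (head_sorted2_min hT0).1
    obtain ⟨c, hc, hc0, _⟩ := hex
    have hm0 : m.1 = 0 := by
      rcases hrank m hmem with h' | h' | h' 
      · exact h'
      all_goals
        exact absurd (lt3_of_fst_lt (a := c) (b := m) (by omega)) (by simp [hmin c hc])
    have := tier_head_eq hmem0 hmem hm0 hmin hT0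
    obtain ⟨pd, pm⟩ := p
    rw [← this]
  | nil =>
    have hT0nil : (c0 :: cs').filterMap sel0 = [] := by
      have hperm := PySem.List.sorted2_perm ((c0 :: cs').filterMap sel0) Prod.fst Prod.snd false
      rw [hT0] at hperm
      exact hperm.symm.eq_nil
    have hno0 : ∀ c ∈ c0 :: cs', c.1 ≠ 0 := by
      intro c hc h0
      have : c.2 ∈ (c0 :: cs').filterMap sel0 := (hmem0 c.2).mpr ⟨c, hc, h0, rfl⟩
      rw [hT0nil] at this
      cases this
    have hmem1 : ∀ y, y ∈ (c0 :: cs').filterMap sel1 ↔ ∃ c ∈ c0 :: cs', c.1 = 1 ∧ c.2 = y := by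
      intro y
      simp only [List.mem_filterMap, sel1]
      constructor
      · rintro ⟨c, hc, hcy⟩
        rw [if_neg (hno0 c hc)] at hcy
        by_cases h1 : c.1 = 1
        · rw [if_pos h1] at hcy; exact ⟨c, hc, h1, Option.some.inj hcy⟩
        · rw [if_neg h1] at hcy; cases hcy
      · rintro ⟨c, hc, h1, rfl⟩
        exact ⟨c, hc, by rw [if_neg (hno0 c hc), if_pos h1]⟩
    cases hT1 : PySem.List.sorted2 ((c0 :: cs').filterMap sel1) Prod.fst Prod.snd with
    | cons p t =>
      have hex := (hmem1 p).mp (head_sorted2_min hT1).1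
      obtain ⟨c, hc, hc1, _⟩ := hex
      have hm1 : m.1 = 1 := by
        rcases hrank m hmem with h' | h' | h'
        · exact absurd h' (hno0 m hmem)
        · exact h'
        · exact absurd (lt3_of_fst_lt (a := c) (b := m) (by omega)) (by simp [hmin c hc])
      have := tier_head_eq hmem1 hmem hm1 hmin hT1
      obtain ⟨pd, pm⟩ := p
      rw [← this]
    | nil =>
      have hT1nil : (c0 :: cs').filterMap sel1 = [] := by
        have hperm := PySem.List.sorted2_perm ((c0 :: cs').filterMap sel1) Prod.fst Prod.snd false
        rw [hT1] at hperm
        exact hperm.symm.eq_nil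
      have hno1 : ∀ c ∈ c0 :: cs', c.1 ≠ 1 := by
        intro c hc h1
        have : c.2 ∈ (c0 :: cs').filterMap sel1 := (hmem1 c.2).mpr ⟨c, hc, h1, rfl⟩
        rw [hT1nil] at this
        cases this
      have hall2 : ∀ c ∈ c0 :: cs', c.1 = 2 := by
        intro c hc
        rcases hrank c hc with h' | h' | h'
        · exact absurd h' (hno0 c hc)
        · exact absurd h' (hno1 c hc)
        · exact h'
      have hmem2 : ∀ y, y ∈ (c0 :: cs').filterMap sel2 ↔ ∃ c ∈ c0 :: cs', c.1 = 2 ∧ c.2 = y := by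
        intro y
        simp only [List.mem_filterMap, sel2]
        constructor
        · rintro ⟨c, hc, hcy⟩
          rw [if_neg (hno0 c hc), if_neg (hno1 c hc)] at hcy
          exact ⟨c, hc, hall2 c hc, Option.some.inj hcy⟩
        · rintro ⟨c, hc, _, rfl⟩
          exact ⟨c, hc, by rw [if_neg (hno0 c hc), if_neg (hno1 c hc)]⟩
      cases hT2 : PySem.List.sorted2 ((c0 :: cs').filterMap sel2) Prod.fst Prod.snd with
      | cons p t =>
        have := tier_head_eq hmem2 hmem (hall2 m hmem) hmin hT2
        obtain ⟨pd, pm⟩ := p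
        rw [← this]
      | nil =>
        exfalso
        have hT2nil : (c0 :: cs').filterMap sel2 = [] := by
          have hperm := PySem.List.sorted2_perm ((c0 :: cs').filterMap sel2) Prod.fst Prod.snd false
          rw [hT2] at hperm
          exact hperm.symm.eq_nil
        have : c0.2 ∈ (c0 :: cs').filterMap sel2 :=
          (hmem2 c0.2).mpr ⟨c0, List.mem_cons_self, hall2 c0 List.mem_cons_self, rfl⟩
        rw [hT2nil] at this
        cases this

-- ===== VERDICT (by name: the statement is the Claim_ definition above) =====
theorem place_in_voice_spec : Claim_equal_place_in_voice := by
  intro pitch voice_idx prefer_upper upper_bound prev_midi _ hpre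
  obtain ⟨hv, hne, hhead, htail⟩ := hpre
  obtain ⟨s, hs⟩ := semitone_exists hne hhead (by
    intro a ha
    have := List.all_eq_true.mp htail a ha
    simp only [Bool.or_eq_true, beq_iff_eq] at this
    tauto)
  show place_in_voice pitch voice_idx prefer_upper upper_bound prev_midi =
    place_in_voice_alt pitch voice_idx prefer_upper upper_bound prev_midi
  unfold place_in_voice place_in_voice_alt
  exact main_eq pitch s _ _ _ upper_bound hs
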